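-- pv_equiv track=rewrite | github.com/ntomazin/Gym-workout-monitoring-method-using-webcam | utils.py | is_in_ROI
-- ===== SOURCE A (Python) =====
-- def is_in_ROI(key_points:dict, ROI_coordinates:tuple, num_of_values:list):
--     #method that checks if the user is in the ROI so it can start with the measurements
--     # ROI ((200, 50), (500, 450)) ((x1,y1),(x2,y2))
--     ROI_x = (ROI_coordinates[0][0], ROI_coordinates[1][0])
--     ROI_y = (ROI_coordinates[0][1], ROI_coordinates[1][1])
--     values = [key_points[x] for x in key_points.keys() if x in num_of_values]
--     for point in values:
--         if point[0] < ROI_x[0] or point[0] > ROI_x[1]: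
--             return False
--         if point[1] < ROI_y[0] or point[1] > ROI_y[1]:
--             return False
--     return True
-- ===== SOURCE B (Python) =====
-- def is_in_ROI(key_points: dict, ROI_coordinates: tuple, num_of_values: list):
--     # bounding-box formulation: compare the min/max of the selected points
--     # against the ROI rectangle instead of scanning with early exit
--     (x1, y1), (x2, y2) = ROI_coordinates
--     pts = [key_points[k] for k in key_points if k in num_of_values]
--     if not pts:
--         return True
--     xs = [p[0] for p in pts]
--     ys = [p[1] for p in pts]
--     return x1 <= min(xs) and max(xs) <= x2 and y1 <= min(ys) and max(ys) <= y2
-- ===== Notes on version B (the rewrite author's own statement) =====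
-- stated objective: alternative
-- what changed: Replaces A's per-point early-exit scan with two return-False tests by computing the bounding box (min/max of x and y) of the selected keypoints once and comparing the box against the ROI rectangle in a single aggregate test (empty selection returns True).
import Mathlib
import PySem

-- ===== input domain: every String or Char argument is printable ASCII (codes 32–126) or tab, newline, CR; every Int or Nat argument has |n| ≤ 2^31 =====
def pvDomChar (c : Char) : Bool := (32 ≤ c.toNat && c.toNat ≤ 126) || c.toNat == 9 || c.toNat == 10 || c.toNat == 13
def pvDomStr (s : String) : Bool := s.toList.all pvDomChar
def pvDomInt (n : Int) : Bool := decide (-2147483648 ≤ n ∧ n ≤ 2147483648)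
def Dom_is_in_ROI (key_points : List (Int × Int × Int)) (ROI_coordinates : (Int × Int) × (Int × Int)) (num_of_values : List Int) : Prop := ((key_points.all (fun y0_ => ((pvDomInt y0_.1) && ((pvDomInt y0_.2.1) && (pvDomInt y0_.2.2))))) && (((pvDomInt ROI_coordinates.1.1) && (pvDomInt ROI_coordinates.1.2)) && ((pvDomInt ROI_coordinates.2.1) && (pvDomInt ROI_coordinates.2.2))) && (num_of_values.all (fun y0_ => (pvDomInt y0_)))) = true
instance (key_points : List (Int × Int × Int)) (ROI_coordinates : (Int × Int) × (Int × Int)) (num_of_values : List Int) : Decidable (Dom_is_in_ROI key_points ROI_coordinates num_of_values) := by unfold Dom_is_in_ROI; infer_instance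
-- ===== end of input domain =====

-- B replaces A's per-point early-exit scan by one aggregate comparison of the
-- filtered points' bounding box (min/max of x and y) against the ROI rectangle
-- (objective: alternative decomposition, same cost).

-- ===== PORT A =====
-- the dict parameter arrives as a triple list; materialise it exactly as Python builds the dict
def pvDictOf (key_points : List (Int × Int × Int)) : PySem.Dict Int (Int × Int) :=
  PySem.Dict.ofList (key_points.map (fun t => (t.1, (t.2.1, t.2.2))))

-- the 'for point in values' loop with its two early 'return False' tests
def pvLoopA (ROI_x ROI_y : Int × Int) : List (Int × Int) → Bool
  | [] => true
  | p :: rest =>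
      if p.1 < ROI_x.1 || p.1 > ROI_x.2 then false
      else if p.2 < ROI_y.1 || p.2 > ROI_y.2 then false
      else pvLoopA ROI_x ROI_y rest

def is_in_ROI (key_points : List (Int × Int × Int)) (ROI_coordinates : (Int × Int) × (Int × Int)) (num_of_values : List Int) : Bool :=
  let ROI_x := (ROI_coordinates.1.1, ROI_coordinates.2.1)
  let ROI_y := (ROI_coordinates.1.2, ROI_coordinates.2.2)
  let d := pvDictOf key_points
  -- [key_points[x] for x in key_points.keys() if x in num_of_values]
  let values := ((d.items).filter (fun kv => num_of_values.contains kv.1)).map (fun kv => kv.2)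
  pvLoopA ROI_x ROI_y values

-- ===== PORT B =====
def is_in_ROI_alt (key_points : List (Int × Int × Int)) (ROI_coordinates : (Int × Int) × (Int × Int)) (num_of_values : List Int) : Bool :=
  let x1 := ROI_coordinates.1.1
  let y1 := ROI_coordinates.1.2
  let x2 := ROI_coordinates.2.1
  let y2 := ROI_coordinates.2.2
  let d := pvDictOf key_points
  let pts := ((d.items).filter (fun kv => num_of_values.contains kv.1)).map (fun kv => kv.2)
  match pts with
  | [] => true
  | p :: t =>
      -- min(xs)/max(xs)/min(ys)/max(ys) as Python's running-extremum folds
      let tx := t.map (fun q => q.1)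
      let ty := t.map (fun q => q.2)
      decide (x1 ≤ tx.foldl min p.1) && decide (tx.foldl max p.1 ≤ x2) &&
      decide (y1 ≤ ty.foldl min p.2) && decide (ty.foldl max p.2 ≤ y2)

-- ===== PRECONDITION & SPEC =====
def Spec_is_in_ROI (key_points : List (Int × Int × Int)) (ROI_coordinates : (Int × Int) × (Int × Int)) (num_of_values : List Int) (out : Bool) : Prop := out = is_in_ROI_alt key_points ROI_coordinates num_of_values
instance (key_points : List (Int × Int × Int)) (ROI_coordinates : (Int × Int) × (Int × Int)) (num_of_values : List Int) (out : Bool) : Decidable (Spec_is_in_ROI key_points ROI_coordinates num_of_values out) := by unfold Spec_is_in_ROI; infer_instance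

-- ===== CLAIM (what is proved, stated in full; the proofs are below) =====
def Claim_equal_is_in_ROI : Prop := ∀ (key_points : List (Int × Int × Int)) (ROI_coordinates : (Int × Int) × (Int × Int)) (num_of_values : List Int), Dom_is_in_ROI key_points ROI_coordinates num_of_values → Spec_is_in_ROI key_points ROI_coordinates num_of_values (is_in_ROI key_points ROI_coordinates num_of_values)

-- ===== LEMMAS AND PROOFS =====

-- A's early-exit loop is the 'all points in bounds' predicate
lemma pvLoopA_eq_all (rx ry : Int × Int) (pts : List (Int × Int)) :
    pvLoopA rx ry pts
      = pts.all (fun p => decide (rx.1 ≤ p.1 ∧ p.1 ≤ rx.2 ∧ ry.1 ≤ p.2 ∧ p.2 ≤ ry.2)) := by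
  induction pts with
  | nil => rfl
  | cons p rest ih =>
      simp only [pvLoopA, List.all_cons, ← ih]
      by_cases h1 : p.1 < rx.1 ∨ p.1 > rx.2
      · have : (p.1 < rx.1 || p.1 > rx.2) = true := by simpa using h1
        simp [this]; omega
      · have : (p.1 < rx.1 || p.1 > rx.2) = false := by simpa using h1
        simp only [this, if_false, Bool.false_eq_true]
        by_cases h2 : p.2 < ry.1 ∨ p.2 > ry.2
        · have : (p.2 < ry.1 || p.2 > ry.2) = true := by simpa using h2
          simp [this]; omega
        · have : (p.2 < ry.1 || p.2 > ry.2) = false := by simpa using h2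
          simp only [this, if_false, Bool.false_eq_true]
          have : decide (rx.1 ≤ p.1 ∧ p.1 ≤ rx.2 ∧ ry.1 ≤ p.2 ∧ p.2 ≤ ry.2) = true := by
            simp; omega
          simp [this]

lemma le_foldl_min_iff (t : List Int) (a q : Int) :
    q ≤ t.foldl min a ↔ q ≤ a ∧ ∀ x ∈ t, q ≤ x := by
  induction t generalizing a with
  | nil => simp
  | cons y ys ih =>
      simp only [List.foldl_cons, ih, List.mem_cons]
      constructor
      · rintro ⟨h, hall⟩
        refine ⟨?_, ?_⟩
        · exact le_trans h (min_le_left _ _)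
        · rintro x (rfl | hx)
          · exact le_trans h (min_le_right _ _)
          · exact hall x hx
      · rintro ⟨ha, hall⟩
        exact ⟨le_min ha (hall y (Or.inl rfl)), fun x hx => hall x (Or.inr hx)⟩

lemma foldl_max_le_iff (t : List Int) (a q : Int) :
    t.foldl max a ≤ q ↔ a ≤ q ∧ ∀ x ∈ t, x ≤ q := by
  induction t generalizing a with
  | nil => simp
  | cons y ys ih =>
      simp only [List.foldl_cons, ih, List.mem_cons]
      constructor
      · rintro ⟨h, hall⟩
        refine ⟨le_trans (le_max_left _ _) h, ?_⟩
        rintro x (rfl | hx)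
        · exact le_trans (le_max_right _ _) h
        · exact hall x hx
      · rintro ⟨ha, hall⟩
        exact ⟨max_le ha (hall y (Or.inl rfl)), fun x hx => hall x (Or.inr hx)⟩

-- the bounding-box test on a nonempty list equals the 'all points in bounds' predicate
lemma box_eq_all (x1 x2 y1 y2 : Int) (p : Int × Int) (t : List (Int × Int)) :
    (decide (x1 ≤ (t.map (fun q => q.1)).foldl min p.1) &&
     decide ((t.map (fun q => q.1)).foldl max p.1 ≤ x2) &&
     decide (y1 ≤ (t.map (fun q => q.2)).foldl min p.2) &&
     decide ((t.map (fun q => q.2)).foldl max p.2 ≤ y2))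
      = (p :: t).all (fun p => decide (x1 ≤ p.1 ∧ p.1 ≤ x2 ∧ y1 ≤ p.2 ∧ p.2 ≤ y2)) := by
  rw [Bool.eq_iff_iff]
  simp only [← Bool.decide_and, decide_eq_true_eq, List.all_eq_true,
    le_foldl_min_iff, foldl_max_le_iff, List.mem_cons, List.mem_map]
  constructor
  · rintro ⟨⟨⟨⟨hp1, hmin1⟩, hp2, hmax1⟩, hp3, hmin2⟩, hp4, hmax2⟩ q hq
    rcases hq with rfl | hq
    · exact ⟨hp1, hp2, hp3, hp4⟩
    · refine ⟨hmin1 _ ⟨q, hq, rfl⟩, hmax1 _ ⟨q, hq, rfl⟩, hmin2 _ ⟨q, hq, rfl⟩, hmax2 _ ⟨q, hq, rfl⟩⟩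
  · intro h
    have hp := h p (Or.inl rfl)
    refine ⟨⟨⟨⟨hp.1, ?_⟩, hp.2.1, ?_⟩, hp.2.2.1, ?_⟩, hp.2.2.2, ?_⟩ <;>
      (rintro x ⟨q, hq, rfl⟩; exact (by have := h q (Or.inr hq); tauto))

-- ===== VERDICT (by name: the statement is the Claim_ definition above) =====
theorem is_in_ROI_spec : Claim_equal_is_in_ROI := by
  intro kp roi nums _
  unfold Spec_is_in_ROI is_in_ROI is_in_ROI_alt
  simp only []
  rw [pvLoopA_eq_all]
  cases h : ((pvDictOf kp).items.filter (fun kv => nums.contains kv.1)).map (fun kv => kv.2) with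
  | nil => rfl
  | cons p t => exact (box_eq_all roi.1.1 roi.2.1 roi.1.2 roi.2.2 p t).symm
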